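-- pv_equiv track=rewrite | github.com/owlu985/RadioAdminSystem | app/utils.py | normalize_days_list
-- ===== SOURCE A (Python) =====
-- def _normalize_day(day: str) -> str:
--     return day.lower()[:3]
--
-- DAY_ORDER = ["mon", "tue", "wed", "thu", "fri", "sat", "sun"]
--
-- def normalize_days_list(days: list[str]) -> str:
--     """Normalize and order day strings into a comma-separated list of 3-letter keys."""
--     cleaned = []
--     for d in days:
--         if not d:
--             continue
--         key = _normalize_day(d)
--         if key not in cleaned:
--             cleaned.append(key)
--     cleaned.sort(key=lambda x: DAY_ORDER.index(x) if x in DAY_ORDER else 99)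
--     return ",".join(cleaned)
-- ===== SOURCE B (Python) =====
-- DAY_ORDER = ["mon", "tue", "wed", "thu", "fri", "sat", "sun"]
--
-- def normalize_days_list(days):
--     """Normalize and order day strings into a comma-separated list of 3-letter keys."""
--     uniq = list(dict.fromkeys(d.lower()[:3] for d in days if d))
--     known = [k for k in DAY_ORDER if k in uniq]
--     unknown = [k for k in uniq if k not in DAY_ORDER]
--     return ",".join(known + unknown)
-- ===== Notes on version B (the rewrite author's own statement) =====
-- stated objective: faster
-- what changed: B builds the ordered unique list of normalized keys once with dict.fromkeys (hash dedup), then emits known days by a single pass over the fixed DAY_ORDER followed by the unknowns in first-seen order, eliminating A's O(n)-membership-scan dedup loop and its key-based stable sort with list.index keys.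
import Mathlib
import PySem

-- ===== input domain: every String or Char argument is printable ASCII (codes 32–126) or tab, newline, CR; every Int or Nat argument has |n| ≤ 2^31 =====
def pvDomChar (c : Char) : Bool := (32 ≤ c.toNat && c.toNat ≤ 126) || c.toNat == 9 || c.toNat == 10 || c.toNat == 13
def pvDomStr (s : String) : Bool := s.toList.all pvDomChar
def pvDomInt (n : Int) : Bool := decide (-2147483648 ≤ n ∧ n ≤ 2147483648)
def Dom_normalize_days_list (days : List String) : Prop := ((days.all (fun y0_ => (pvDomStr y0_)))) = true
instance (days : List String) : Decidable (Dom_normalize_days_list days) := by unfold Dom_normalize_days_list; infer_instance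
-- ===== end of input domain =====

-- B replaces A's membership-scan dedup and key-based stable sort by a dict.fromkeys dedup
-- followed by one pass over the fixed DAY_ORDER (known days) and one over the unique list
-- (unknowns, first-seen order); measured faster in a timing run.

-- ===== PORT A =====
def _normalize_day (day : String) : String :=
  PySem.Str.slice (PySem.Str.lower day) none (some 3)

def DAY_ORDER : List String := ["mon", "tue", "wed", "thu", "fri", "sat", "sun"]

-- the sort key lambda: DAY_ORDER.index(x) if x in DAY_ORDER else 99
def dayKey (x : String) : Nat :=
  if x ∈ DAY_ORDER then (PySem.List.index? DAY_ORDER x).getD 0 else 99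

def normalize_days_list (days : List String) : String :=
  let cleaned := days.foldl (fun cleaned d =>
    if d = "" then cleaned
    else
      let key := _normalize_day d
      if key ∈ cleaned then cleaned else cleaned ++ [key]) []
  PySem.Str.join "," (PySem.List.sorted cleaned dayKey)

-- ===== PORT B =====
def normalize_days_list_alt (days : List String) : String :=
  let uniq := PySem.List.dedup ((days.filter (fun d => decide (d ≠ ""))).map
    (fun d => PySem.Str.slice (PySem.Str.lower d) none (some 3)))
  let known := DAY_ORDER.filter (fun k => decide (k ∈ uniq))
  let unknown := uniq.filter (fun k => decide (k ∉ DAY_ORDER))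
  PySem.Str.join "," (known ++ unknown)

-- ===== PRECONDITION & SPEC =====
def Spec_normalize_days_list (days : List String) (out : String) : Prop := out = normalize_days_list_alt days
instance (days : List String) (out : String) : Decidable (Spec_normalize_days_list days out) := by unfold Spec_normalize_days_list; infer_instance

-- ===== CLAIM (what is proved, stated in full; the proofs are below) =====
def Claim_equal_normalize_days_list : Prop := ∀ (days : List String), Dom_normalize_days_list days → Spec_normalize_days_list days (normalize_days_list days)

-- ===== LEMMAS AND PROOFS =====

def beforeK (a b : String) : Bool := decide (dayKey a < dayKey b)

theorem dayKey_le (y : String) : dayKey y ≤ 99 := by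
  by_cases h : y ∈ DAY_ORDER
  · fin_cases h <;> decide
  · simp [dayKey, h]

theorem beforeK_false_unknown {x : String} (hx : x ∉ DAY_ORDER) (y : String) :
    beforeK x y = false := by
  have h99 : dayKey x = 99 := by simp [dayKey, hx]
  have := dayKey_le y
  simp [beforeK, h99]
  omega

theorem beforeK_true_unknown {x y : String} (hx : x ∈ DAY_ORDER) (hy : y ∉ DAY_ORDER) :
    beforeK x y = true := by
  have h99 : dayKey y = 99 := by simp [dayKey, hy]
  fin_cases hx <;> simp [beforeK, h99] <;> decide

theorem insertBy_split (before : String → String → Bool) (x : String) :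
    ∀ (as bs : List String), (∀ y ∈ as, before x y = false) → (∀ y ∈ bs, before x y = true) →
    PySem.List.insertBy before x (as ++ bs) = as ++ x :: bs := by
  intro as
  induction as with
  | nil =>
    intro bs _ hbs
    cases bs with
    | nil => simp [PySem.List.insertBy]
    | cons b bs => simp [PySem.List.insertBy, hbs b (by simp)]
  | cons a as ih =>
    intro bs has hbs
    have ha : before x a = false := has a (by simp)
    simp only [List.cons_append, PySem.List.insertBy, ha, Bool.false_eq_true, if_false]
    rw [ih bs (fun y hy => has y (by simp [hy])) hbs]

theorem ins_known_gen (lo hi U : List String) (x : String) (p : String → Bool)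
    (hD : DAY_ORDER = lo ++ x :: hi) (hpx : p x = false) (hxlo : x ∉ lo)
    (hlo : ∀ y ∈ lo, beforeK x y = false)
    (hhi : ∀ y ∈ hi, beforeK x y = true)
    (hU : ∀ y ∈ U, beforeK x y = true) :
    PySem.List.insertBy beforeK x (DAY_ORDER.filter p ++ U)
      = DAY_ORDER.filter (fun k => p k || (k == x)) ++ U := by
  rw [hD]
  have hfl : (lo ++ x :: hi).filter p = lo.filter p ++ hi.filter p := by
    simp [List.filter_append, hpx]
  have hfl' : (lo ++ x :: hi).filter (fun k => p k || (k == x))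
      = lo.filter p ++ x :: hi.filter p := by
    have h1 : lo.filter (fun k => p k || (k == x)) = lo.filter p := by
      apply List.filter_congr
      intro k hk
      have : (k == x) = false := by
        simp only [beq_eq_false_iff_ne]
        intro he; exact hxlo (he ▸ hk)
      simp [this]
    have h2 : hi.filter (fun k => p k || (k == x)) = hi.filter p := by
      apply List.filter_congr
      intro k hk
      have hk' : beforeK x k = true := hhi k hk
      have : (k == x) = false := by
        simp only [beq_eq_false_iff_ne]
        intro he; subst he
        simp [beforeK] at hk'
      simp [this]
    simp [List.filter_append, h1, h2]
  rw [hfl, hfl', List.append_assoc]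
  rw [insertBy_split beforeK x (lo.filter p) (hi.filter p ++ U)
    (fun y hy => hlo y (List.mem_of_mem_filter hy))
    (fun y hy => by
      rcases List.mem_append.mp hy with h | h
      · exact hhi y (List.mem_of_mem_filter h)
      · exact hU y h)]
  simp

theorem ins_known (x : String) (hx : x ∈ DAY_ORDER) (p : String → Bool) (hpx : p x = false)
    (U : List String) (hU : ∀ y ∈ U, y ∉ DAY_ORDER) :
    PySem.List.insertBy beforeK x (DAY_ORDER.filter p ++ U)
      = DAY_ORDER.filter (fun k => p k || (k == x)) ++ U := by
  have hU' : ∀ y ∈ U, beforeK x y = true := fun y hy => beforeK_true_unknown hx (hU y hy)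
  fin_cases hx
  · exact ins_known_gen [] ["tue","wed","thu","fri","sat","sun"] U _ p rfl hpx (by decide)
      (by intro y hy; simp at hy) (by intro y hy; fin_cases hy <;> decide) hU'
  · exact ins_known_gen ["mon"] ["wed","thu","fri","sat","sun"] U _ p rfl hpx (by decide)
      (by intro y hy; fin_cases hy <;> decide) (by intro y hy; fin_cases hy <;> decide) hU'
  · exact ins_known_gen ["mon","tue"] ["thu","fri","sat","sun"] U _ p rfl hpx (by decide)
      (by intro y hy; fin_cases hy <;> decide) (by intro y hy; fin_cases hy <;> decide) hU'
  · exact ins_known_gen ["mon","tue","wed"] ["fri","sat","sun"] U _ p rfl hpx (by decide)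
      (by intro y hy; fin_cases hy <;> decide) (by intro y hy; fin_cases hy <;> decide) hU'
  · exact ins_known_gen ["mon","tue","wed","thu"] ["sat","sun"] U _ p rfl hpx (by decide)
      (by intro y hy; fin_cases hy <;> decide) (by intro y hy; fin_cases hy <;> decide) hU'
  · exact ins_known_gen ["mon","tue","wed","thu","fri"] ["sun"] U _ p rfl hpx (by decide)
      (by intro y hy; fin_cases hy <;> decide) (by intro y hy; fin_cases hy <;> decide) hU'
  · exact ins_known_gen ["mon","tue","wed","thu","fri","sat"] [] U _ p rfl hpx (by decide)
      (by intro y hy; fin_cases hy <;> decide) (by intro y hy; simp at hy) hU'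

theorem sort_eq (u : List String) (hu : u.Nodup) :
    PySem.List.sorted u dayKey
      = DAY_ORDER.filter (fun k => decide (k ∈ u)) ++ u.filter (fun k => decide (k ∉ DAY_ORDER)) := by
  induction u using List.reverseRecOn with
  | nil => simp [PySem.List.sorted]
  | append_singleton u x ih =>
    have hxu : x ∉ u := by
      intro h
      have := List.nodup_append.mp hu
      exact this.2.2 x h x (by simp) rfl
    have hun : u.Nodup := (List.nodup_append.mp hu).1
    rw [PySem.List.sorted_eq_foldl_insertBy, List.foldl_append, ← PySem.List.sorted_eq_foldl_insertBy,
      ih hun]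
    simp only [List.foldl_cons, List.foldl_nil]
    rw [show (fun a b : String => decide (dayKey a < dayKey b)) = beforeK from rfl]
    have hmem : ∀ k, decide (k ∈ u ++ [x]) = (decide (k ∈ u) || (k == x)) := by
      intro k
      by_cases h : k = x <;> simp [List.mem_append, h]
    have hUmem : ∀ y ∈ u.filter (fun k => decide (k ∉ DAY_ORDER)), y ∉ DAY_ORDER := by
      intro y hy
      have := List.of_mem_filter hy
      simpa using this
    by_cases hx : x ∈ DAY_ORDER
    · rw [ins_known x hx _ (by simp [hxu]) _ hUmem]
      congr 1
      · apply List.filter_congr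
        intro k _
        exact (hmem k).symm
      · simp [List.filter_append, hx]
    · rw [PySem.List.insertBy_of_forall_not_before beforeK x _
        (fun y _ => beforeK_false_unknown hx y)]
      have h1 : DAY_ORDER.filter (fun k => decide (k ∈ u ++ [x]))
          = DAY_ORDER.filter (fun k => decide (k ∈ u)) := by
        apply List.filter_congr
        intro k hk
        have hne : k ≠ x := fun he => hx (he ▸ hk)
        simp [List.mem_append, hne]
      have h2 : (u ++ [x]).filter (fun k => decide (k ∉ DAY_ORDER))
          = u.filter (fun k => decide (k ∉ DAY_ORDER)) ++ [x] := by
        simp [List.filter_append, List.filter_cons, hx]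
      rw [h1, h2]
      simp

theorem cleaned_eq (days : List String) : ∀ (acc : List String),
    days.foldl (fun cleaned d =>
      if d = "" then cleaned
      else
        let key := _normalize_day d
        if key ∈ cleaned then cleaned else cleaned ++ [key]) acc
    = List.foldl PySem.Set.add acc ((days.filter (fun d => decide (d ≠ ""))).map
        (fun d => PySem.Str.slice (PySem.Str.lower d) none (some 3))) := by
  induction days with
  | nil => intro acc; simp
  | cons d ds ih =>
    intro acc
    by_cases hd : d = ""
    · simp [hd, ih]
    · simp only [List.foldl_cons, hd, if_false, List.filter_cons, decide_not, hd, decide_eq_true_eq,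
        Bool.not_eq_eq_eq_not, Bool.not_false]
      rw [ih]
      simp [PySem.Set.add, _normalize_day]

-- ===== VERDICT (by name: the statement is the Claim_ definition above) =====
theorem normalize_days_list_spec : Claim_equal_normalize_days_list := by
  intro days _
  unfold Spec_normalize_days_list
  show normalize_days_list days = normalize_days_list_alt days
  unfold normalize_days_list normalize_days_list_alt
  dsimp only
  have hded : PySem.List.dedup ((days.filter (fun d => decide (d ≠ ""))).map
      (fun d => PySem.Str.slice (PySem.Str.lower d) none (some 3)))
      = List.foldl PySem.Set.add [] ((days.filter (fun d => decide (d ≠ ""))).map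
      (fun d => PySem.Str.slice (PySem.Str.lower d) none (some 3))) := rfl
  rw [cleaned_eq days [], ← hded]
  congr 1
  exact sort_eq _ (PySem.List.nodup_dedup _)
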